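-- pv_equiv track=rewrite | github.com/Alice-chenjj/study | q30.py | qual_stat
-- ===== SOURCE A (Python) =====
-- def qual_stat(qstr):
--     q20 = 0
--     q30 = 0
--     for q in qstr:
--         if q >= '5':
--             q20 += 1
--             if q >= '?':
--                 q30 += 1
--     return q20, q30
-- ===== SOURCE B (Python) =====
-- def qual_stat(qstr):
--     freq = {}
--     for q in qstr:
--         freq[q] = freq.get(q, 0) + 1
--     q20 = sum(v for ch, v in freq.items() if ch >= '5')
--     q30 = sum(v for ch, v in freq.items() if ch >= '?')
--     return q20, q30
-- ===== Notes on version B (the rewrite author's own statement) =====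
-- stated objective: idiomatic
-- what changed: B builds a character frequency table in one pass and then derives both counts by summing multiplicities over the distinct characters, instead of A's per-character conditional increments with a nested threshold test.
import Mathlib
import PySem

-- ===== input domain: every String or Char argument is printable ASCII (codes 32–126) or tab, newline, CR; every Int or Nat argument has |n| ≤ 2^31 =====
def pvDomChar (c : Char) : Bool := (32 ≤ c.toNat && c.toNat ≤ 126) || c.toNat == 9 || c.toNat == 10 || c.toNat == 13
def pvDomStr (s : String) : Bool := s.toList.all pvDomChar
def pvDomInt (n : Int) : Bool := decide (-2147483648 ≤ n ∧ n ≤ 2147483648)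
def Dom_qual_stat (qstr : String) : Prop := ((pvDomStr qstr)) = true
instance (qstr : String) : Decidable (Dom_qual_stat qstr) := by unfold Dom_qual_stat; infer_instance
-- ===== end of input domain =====

-- B replaces A's per-character conditional increments by a frequency table plus
-- two grouped sums over the distinct characters (idiomatic; same return value).

-- ===== PORT A =====
-- literal port of A: one pass, two accumulators, nested threshold tests
def qual_stat (qstr : String) : Int × Int :=
  qstr.toList.foldl
    (fun (p : Int × Int) q =>
      if '5' ≤ q then (p.1 + 1, if '?' ≤ q then p.2 + 1 else p.2) else p)
    (0, 0)

-- ===== PORT B =====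
-- literal port of Source B: build freq = {q: multiplicity}, then sum v over items with ch ≥ threshold
def qual_stat_alt (qstr : String) : Int × Int :=
  let freq := qstr.toList.foldl (fun (d : PySem.Dict Char Int) q => d.insert q (d.getD q 0 + 1)) PySem.Dict.empty
  let q20 := freq.items.foldl (fun (acc : Int) p => if '5' ≤ p.1 then acc + p.2 else acc) 0
  let q30 := freq.items.foldl (fun (acc : Int) p => if '?' ≤ p.1 then acc + p.2 else acc) 0
  (q20, q30)

-- ===== PRECONDITION & SPEC =====
def Spec_qual_stat (qstr : String) (out : Int × Int) : Prop := out = qual_stat_alt qstr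
instance (qstr : String) (out : Int × Int) : Decidable (Spec_qual_stat qstr out) := by unfold Spec_qual_stat; infer_instance

-- ===== CLAIM (what is proved, stated in full; the proofs are below) =====
def Claim_equal_qual_stat : Prop := ∀ (qstr : String), Dom_qual_stat qstr → Spec_qual_stat qstr (qual_stat qstr)

-- ===== LEMMAS AND PROOFS =====

-- A's loop computes the two counts (the nested if flattens because '5' ≤ '?')
theorem qual_stat_loop (l : List Char) (a b : Int) :
    l.foldl
      (fun (p : Int × Int) q =>
        if '5' ≤ q then (p.1 + 1, if '?' ≤ q then p.2 + 1 else p.2) else p)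
      (a, b)
    = (a + (l.countP (fun q => decide ('5' ≤ q)) : Int),
       b + (l.countP (fun q => decide ('?' ≤ q)) : Int)) := by
  induction l generalizing a b with
  | nil => simp
  | cons q l ih =>
    by_cases h5 : '5' ≤ q
    · by_cases h9 : '?' ≤ q
      · simp [h5, h9, ih]
        constructor <;> ring
      · simp [h5, h9, ih]
        ring
    · have h9 : ¬ '?' ≤ q := fun h => h5 (le_trans (by decide : ('5':Char) ≤ '?') h)
      simp [h5, h9, ih]

-- counting with 'member of k :: s' splits off the k-term when k ∉ s
theorem countP_split (P : Char → Bool) (k : Char) (s : List Char) (hk : k ∉ s) (l : List Char) :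
    l.countP (fun x => P x && decide (x ∈ k :: s))
    = (if P k then l.count k else 0) + l.countP (fun x => P x && decide (x ∈ s)) := by
  induction l with
  | nil => simp
  | cons y l ihl =>
    rw [List.countP_cons, List.countP_cons, ihl, List.count_cons]
    by_cases hyk : y = k
    · subst hyk
      simp only [List.mem_cons, decide_eq_true_eq]
      by_cases hP : P y <;> simp [hP, hk] <;> omega
    · simp only [List.mem_cons]
      by_cases hys : y ∈ s <;> by_cases hP : P y <;>
        simp [hys, hP, hyk, Ne.symm hyk] <;> omega

-- summing multiplicities over a nodup key list equals counting in l
theorem sum_counts (l : List Char) (c : Char) :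
    ∀ (s : List Char) (a : Int), s.Nodup →
      s.foldl (fun (acc : Int) k => if c ≤ k then acc + (l.count k : Int) else acc) a
      = a + (l.countP (fun x => decide (c ≤ x) && decide (x ∈ s)) : Int) := by
  intro s
  induction s with
  | nil => simp
  | cons k s ih =>
    intro a hnd
    have hk : k ∉ s := (List.nodup_cons.mp hnd).1
    have hsplit := countP_split (fun x => decide (c ≤ x)) k s hk l
    by_cases hP : c ≤ k
    · simp only [List.foldl_cons, if_pos hP, ih _ (List.nodup_cons.mp hnd).2, hsplit,
        decide_eq_true hP]
      push_cast; ring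
    · simp only [List.foldl_cons, if_neg hP, ih _ (List.nodup_cons.mp hnd).2, hsplit]
      simp [hP]

-- B's grouped sum over distinct characters equals the direct count
theorem alt_sum (l : List Char) (c : Char) :
    (((PySem.Set.ofList l).map (fun k => (k, (l.count k : Int)))).foldl
        (fun (acc : Int) p => if c ≤ p.1 then acc + p.2 else acc) 0)
    = (l.countP (fun q => decide (c ≤ q)) : Int) := by
  rw [List.foldl_map]
  rw [sum_counts l c (PySem.Set.ofList l) 0 (PySem.Set.nodup_ofList l)]
  have h2 : l.countP (fun x => decide (c ≤ x) && decide (x ∈ PySem.Set.ofList l))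
      = l.countP (fun q => decide (c ≤ q)) := by
    apply List.countP_congr
    intro x hx
    simp [PySem.Set.mem_ofList, hx]
  rw [h2]; simp

-- ===== VERDICT (by name: the statement is the Claim_ definition above) =====
theorem qual_stat_spec : Claim_equal_qual_stat := by
  intro qstr _
  unfold Spec_qual_stat qual_stat qual_stat_alt
  have hfreq : qstr.toList.foldl
      (fun (d : PySem.Dict Char Int) q => d.insert q (d.getD q 0 + 1)) PySem.Dict.empty
      = PySem.Dict.counter qstr.toList :=
    PySem.Dict.foldl_insert_getD_add_one_eq_counter qstr.toList
  rw [qual_stat_loop]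
  simp only [hfreq, PySem.Dict.items_counter]
  rw [alt_sum qstr.toList '5', alt_sum qstr.toList '?']
  simp
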